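-- pv_equiv track=rewrite | github.com/TheNitromeFan/baekjoon | 19975.py | hyperlink
-- ===== SOURCE A (Python) =====
-- import string
--
-- def matches(string1, string2):
--     if len(string1) != len(string2) or string1[0].lower() != string2[0].lower():
--         return False
--     for i in range(1, len(string1)):
--         if string1[i] != string2[i]:
--             return False
--     return True
--
-- def hyperlink(article, title, redirects):
--     new_article = ""
--     current_word = ""
--     for letter in article:
--         if letter not in string.ascii_letters:
--             for keyword, target in redirects.items():
--                 if matches(current_word, keyword):
--                     if title == target:
--                         continue
--                     if keyword == target:
--                         new_article += f"[[{current_word}]]"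
--                     else:
--                         new_article += f"[[{target}|{current_word}]]"
--                     current_word = ""
--                     break
--             new_article += current_word
--             current_word = ""
--             new_article += letter
--         else:
--             current_word += letter
--     for keyword, target in redirects.items():
--         if matches(current_word, keyword):
--             if title == target:
--                 continue
--             if keyword == target:
--                 new_article += f"[[{current_word}]]"
--             else:
--                 new_article += f"[[{target}|{current_word}]]"
--             break
--     else:
--         new_article += current_word
--     return new_article
-- ===== SOURCE B (Python) =====
-- import string
--
-- def hyperlink(article, title, redirects):
--     letters = set(string.ascii_letters)
--     # one pass over the redirects: index by normalized form (first char lowercased),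
--     # keeping only the first entry whose target differs from the title
--     index = {}
--     for keyword, target in redirects.items():
--         if not keyword or target == title:
--             continue
--         norm = keyword[0].lower() + keyword[1:]
--         if norm not in index:
--             index[norm] = (keyword, target)
--     out = []
--     word = []
--
--     def flush():
--         w = ''.join(word)
--         word.clear()
--         hit = index.get(w[0].lower() + w[1:]) if w else None
--         if hit is None:
--             out.append(w)
--         else:
--             keyword, target = hit
--             out.append(f"[[{w}]]" if keyword == target else f"[[{target}|{w}]]")
--
--     for ch in article:
--         if ch in letters:
--             word.append(ch)
--         else:
--             flush()
--             out.append(ch)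
--     flush()
--     return ''.join(out)
-- ===== Notes on version B (the rewrite author's own statement) =====
-- stated objective: alternative
-- what changed: Instead of scanning every redirect entry with a char-by-char matches() at each word boundary, B builds (in one pass over the redirects) a dictionary keyed on the normalized keyword (first character lowercased) holding the first entry whose target differs from the title, and resolves each word by a single dictionary lookup.
-- outside the precondition, e.g. on hyperlink('ab', 't', {'': 'x'}): A returns 'ab', B returns 'ab'
import Mathlib
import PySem

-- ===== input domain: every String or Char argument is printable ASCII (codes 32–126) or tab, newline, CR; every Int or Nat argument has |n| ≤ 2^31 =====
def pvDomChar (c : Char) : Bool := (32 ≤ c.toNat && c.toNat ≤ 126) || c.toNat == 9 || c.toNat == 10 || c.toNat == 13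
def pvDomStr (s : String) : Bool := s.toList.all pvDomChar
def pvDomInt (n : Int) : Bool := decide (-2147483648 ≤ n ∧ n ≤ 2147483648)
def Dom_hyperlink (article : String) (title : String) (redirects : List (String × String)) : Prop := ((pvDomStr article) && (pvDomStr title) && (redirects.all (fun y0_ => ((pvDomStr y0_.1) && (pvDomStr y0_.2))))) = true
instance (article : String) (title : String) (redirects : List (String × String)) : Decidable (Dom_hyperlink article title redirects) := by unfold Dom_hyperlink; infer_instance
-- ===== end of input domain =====

-- B replaces A's per-word linear scan over all redirects by a dictionary keyed on the
-- normalized (first-char-lowercased) keyword, built once; one lookup per word.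

def asciiLettersList : List Char :=
  "abcdefghijklmnopqrstuvwxyzABCDEFGHIJKLMNOPQRSTUVWXYZ".toList

-- ===== PORT A =====
-- matches(string1, string2); on two EMPTY strings Python raises IndexError at
-- string1[0] — there this port returns a junk value (those inputs are outside Pre_).
def pyMatches (s1 s2 : List Char) : Bool :=
  if s1.length != s2.length
      || (PySem.List.pyGet? s1 0).map PySem.Chars.lowerChar
          != (PySem.List.pyGet? s2 0).map PySem.Chars.lowerChar then
    false
  else
    (PySem.List.pyRange 1 (s1.length : Int) 1).all fun i =>
      PySem.List.pyGet? s1 i == PySem.List.pyGet? s2 i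

-- the inner 'for keyword, target in redirects.items(): … continue … break' loop
def scanA (title : String) (w : List Char) : List (String × String) → Option (String × String)
  | [] => none
  | (keyword, target) :: rest =>
    if pyMatches w keyword.toList then
      if title == target then scanA title w rest
      else some (keyword, target)
    else scanA title w rest

-- the characters A appends at a word boundary (a link on a hit, the bare word otherwise)
def chunkA (title : String) (items : List (String × String)) (w : List Char) : List Char :=
  match scanA title w items with
  | some (keyword, target) =>
    if keyword == target then "[[".toList ++ w ++ "]]".toList
    else "[[".toList ++ target.toList ++ "|".toList ++ w ++ "]]".toList
  | none => w

-- the body of A's 'for letter in article' loop; state = (new_article, current_word)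
def stepA (title : String) (items : List (String × String))
    (st : List Char × List Char) (letter : Char) : List Char × List Char :=
  if !(asciiLettersList.contains letter) then
    (st.1 ++ chunkA title items st.2 ++ [letter], [])
  else
    (st.1, st.2 ++ [letter])

def hyperlink (article : String) (title : String) (redirects : List (String × String)) : String :=
  let items := (PySem.Dict.ofList redirects).items   -- Python receives `redirects` as a dict
  let fin := article.toList.foldl (stepA title items) ([], [])
  String.ofList (fin.1 ++ chunkA title items fin.2)

-- ===== PORT B =====
-- keyword[0].lower() + keyword[1:]
def normFirst : List Char → List Char
  | [] => []
  | c :: cs => PySem.Chars.lowerChar c :: cs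

-- the body of B's index-building loop
def indexStep (title : String) (d : PySem.Dict String (String × String))
    (kv : String × String) : PySem.Dict String (String × String) :=
  if kv.1 == "" || kv.2 == title then d
  else
    let norm := String.ofList (normFirst kv.1.toList)
    if d.contains norm then d else d.insert norm kv

def buildIndex (title : String) (items : List (String × String)) :
    PySem.Dict String (String × String) :=
  items.foldl (indexStep title) PySem.Dict.empty

-- flush(): the one string B appends to `out` for the finished word
def flushB (index : PySem.Dict String (String × String)) (w : List Char) : String :=
  let hit := if w.isEmpty then none else index.get? (String.ofList (normFirst w))
  match hit with
  | none => String.ofList w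
  | some (keyword, target) =>
    if keyword == target then String.ofList ("[[".toList ++ w ++ "]]".toList)
    else String.ofList ("[[".toList ++ target.toList ++ "|".toList ++ w ++ "]]".toList)

-- the body of B's 'for ch in article' loop; state = (out, word)
def stepB (letters : PySem.Set Char) (index : PySem.Dict String (String × String))
    (st : List String × List Char) (ch : Char) : List String × List Char :=
  if PySem.Set.contains letters ch then (st.1, st.2 ++ [ch])
  else (st.1 ++ [flushB index st.2, String.ofList [ch]], [])

def hyperlink_alt (article : String) (title : String) (redirects : List (String × String)) : String :=
  let letters := PySem.Set.ofList asciiLettersList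
  let index := buildIndex title (PySem.Dict.ofList redirects).items
  let fin := article.toList.foldl (stepB letters index) ([], [])
  PySem.Str.join "" (fin.1 ++ [flushB index fin.2])

-- ===== PRECONDITION & SPEC =====
-- Pre_ excludes redirects containing an empty keyword: there A's matches('', '')
-- raises IndexError as soon as a word boundary with an empty current word occurs
-- (A returns only when the article has no such boundary; those returns are excluded too).
def Pre_hyperlink (article : String) (title : String) (redirects : List (String × String)) : Prop :=
  ∀ p ∈ redirects, p.1 ≠ ""
instance (article : String) (title : String) (redirects : List (String × String)) : Decidable (Pre_hyperlink article title redirects) := by unfold Pre_hyperlink; infer_instance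

def pvWitness_hyperlink : String × String × (List (String × String)) :=
  ("Hello, world!", "Greeting", [("hello", "Greeting"), ("world", "world"), ("World", "Earth")])

def Spec_hyperlink (article : String) (title : String) (redirects : List (String × String)) (out : String) : Prop := out = hyperlink_alt article title redirects
instance (article : String) (title : String) (redirects : List (String × String)) (out : String) : Decidable (Spec_hyperlink article title redirects out) := by unfold Spec_hyperlink; infer_instance

-- ===== CLAIM (what is proved, stated in full; the proofs are below) =====
def Claim_equal_hyperlink : Prop := ∀ (article : String) (title : String) (redirects : List (String × String)), Dom_hyperlink article title redirects → Pre_hyperlink article title redirects → Spec_hyperlink article title redirects (hyperlink article title redirects)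

-- ===== LEMMAS AND PROOFS =====

theorem ofList_beq (a b : List Char) : (String.ofList a == String.ofList b) = (a == b) := by
  by_cases h : a = b
  · simp [h]
  · have hne : String.ofList a ≠ String.ofList b := by
      intro he; exact h (by simpa using congrArg String.toList he)
    simp [h, hne]

theorem intercalate_nil_flatten (ls : List (List Char)) :
    List.intercalate ([] : List Char) ls = ls.flatten := by
  induction ls with
  | nil => rfl
  | cons x xs ih =>
    cases xs with
    | nil => simp [List.intercalate]
    | cons y t =>
      simp only [List.intercalate, List.intersperse] at *
      simpa using ih

theorem join_empty (parts : List String) :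
    PySem.Str.join "" parts = String.ofList ((parts.map String.toList).flatten) := by
  apply String.toList_inj.mp
  simp [PySem.Str.join, PySem.Chars.join, intercalate_nil_flatten]

theorem allTail (c d : Char) (cs ds : List Char) (h : cs.length = ds.length) :
    ((PySem.List.pyRange 1 ((c::cs).length : Int) 1).all fun i =>
        PySem.List.pyGet? (c::cs) i == PySem.List.pyGet? (d::ds) i) = (cs == ds) := by
  have hget : ∀ (xs : List Char) (x : Char) (k : Nat),
      PySem.List.pyGet? (x::xs) (1 + (k : Int)) = xs[k]? := by
    intro xs x k
    have : (1 + (k : Int)) = ((k + 1 : Nat) : Int) := by push_cast; ring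
    rw [this, PySem.List.pyGet?_natCast]
    simp
  rw [PySem.List.pyRange_one]
  have hlen : ((((c::cs).length : Int)) - 1).toNat = cs.length := by simp
  rw [hlen, List.all_map]
  rw [Bool.eq_iff_iff]
  simp only [List.all_eq_true, List.mem_range, Function.comp_apply, hget, beq_iff_eq]
  constructor
  · intro hall
    have : cs = ds := by
      apply List.ext_getElem?
      intro i
      by_cases hi : i < cs.length
      · exact hall i hi
      · rw [List.getElem?_eq_none (by omega), List.getElem?_eq_none (by omega)]
    simp [this]
  · rintro rfl i _
    rfl

theorem pyMatches_eq (w k : List Char) (hw : w ≠ []) :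
    pyMatches w k = (normFirst w == normFirst k) := by
  cases w with
  | nil => exact absurd rfl hw
  | cons c cs =>
    cases k with
    | nil => simp [pyMatches, normFirst]
    | cons d ds =>
      by_cases hlen : cs.length = ds.length
      · by_cases hc : PySem.Chars.lowerChar c = PySem.Chars.lowerChar d
        · have h1 : pyMatches (c::cs) (d::ds)
              = ((PySem.List.pyRange 1 ((c::cs).length : Int) 1).all fun i =>
                  PySem.List.pyGet? (c::cs) i == PySem.List.pyGet? (d::ds) i) := by
            simp [pyMatches, hlen, hc]
          rw [h1, allTail c d cs ds hlen]
          simp [normFirst, hc]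
        · simp [pyMatches, normFirst, hlen, hc]
      · have hne : cs ≠ ds := fun he => hlen (by rw [he])
        simp [pyMatches, normFirst, hlen, hne]

theorem scanA_eq_find? (title : String) (w : List Char) (items : List (String × String)) :
    scanA title w items
      = items.find? (fun e => pyMatches w e.1.toList && !(title == e.2)) := by
  induction items with
  | nil => rfl
  | cons e rest ih =>
    obtain ⟨k, t⟩ := e
    cases hm : pyMatches w k.toList <;> cases ht : (title == t) <;>
      simp [scanA, hm, ht, ih]

theorem buildIndex_get? (title : String) (n : String) (hn : n ≠ "")
    (items : List (String × String)) (d : PySem.Dict String (String × String)) :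
    (items.foldl (indexStep title) d).get? n
      = match d.get? n with
        | some v => some v
        | none => items.find?
            (fun kv => (!(kv.1 == "") && !(kv.2 == title))
                        && (String.ofList (normFirst kv.1.toList) == n)) := by
  induction items generalizing d with
  | nil =>
    cases hd : d.get? n <;> simp [hd]
  | cons kv rest ih =>
    obtain ⟨k, t⟩ := kv
    rw [List.foldl_cons, List.find?_cons]
    by_cases hk : k = ""
    · subst hk
      have hstep : indexStep title d ("", t) = d := by simp [indexStep]
      rw [hstep, ih]
      simp
    · by_cases ht : t = title
      · subst ht
        have hstep : indexStep t d (k, t) = d := by simp [indexStep]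
        rw [hstep, ih]
        simp
      · set m := String.ofList (normFirst k.toList) with hm
        have hpt : ((!(k == "") && !(t == title)) && (m == n))
            = (m == n) := by simp [hk, ht]
        by_cases hcon : d.contains m
        · have hstep : indexStep title d (k, t) = d := by
            simp [indexStep, hk, ht, ← hm, hcon]
          rw [hstep, ih]
          by_cases hmn : m = n
          · subst hmn
            have hsome : (d.get? m).isSome := by
              rw [← PySem.Dict.contains_eq_isSome_get?]; exact hcon
            obtain ⟨v, hv⟩ := Option.isSome_iff_exists.mp hsome
            simp [hv]
          · have h1 : (m == n) = false := by simp [hmn]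
            rw [hpt, h1]
        · have hstep : indexStep title d (k, t) = d.insert m (k, t) := by
            simp [indexStep, hk, ht, ← hm, hcon]
          rw [hstep, ih]
          by_cases hmn : m = n
          · subst hmn
            have hnone : d.get? m = none := by
              rw [PySem.Dict.get?_eq_none_iff_contains]
              simpa using hcon
            have h1 : (m == m) = true := by simp
            rw [hnone, hpt, h1, PySem.Dict.get?_insert_self]
          · have h1 : (m == n) = false := by simp [hmn]
            have h2 : (d.insert m (k, t)).get? n = d.get? n :=
              PySem.Dict.get?_insert_of_ne _ _ (fun he => hmn he.symm)
            rw [h2, hpt, h1]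

theorem chunk_eq (title : String) (items : List (String × String))
    (hk : ∀ p ∈ items, p.1 ≠ "") (w : List Char) :
    chunkA title items w = (flushB (buildIndex title items) w).toList := by
  by_cases hw : w = []
  · subst hw
    have hnone : scanA title [] items = none := by
      rw [scanA_eq_find?]
      apply List.find?_eq_none.mpr
      intro e he
      have h1 : e.1.toList ≠ [] := by
        intro h0
        exact hk e he (by simpa using congrArg String.ofList h0)
      simp [pyMatches]
      intro hlen
      exact absurd (by simpa using hlen.symm) h1
    simp [chunkA, hnone, flushB]
  · have hn : String.ofList (normFirst w) ≠ "" := by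
      intro h0
      have h1 : normFirst w = [] := by simpa using congrArg String.toList h0
      cases w with
      | nil => exact hw rfl
      | cons c cs => simp [normFirst] at h1
    have hwe : w.isEmpty = false := by simpa using hw
    have hget : (buildIndex title items).get? (String.ofList (normFirst w))
        = items.find? (fun kv => (!(kv.1 == "") && !(kv.2 == title))
            && (String.ofList (normFirst kv.1.toList) == String.ofList (normFirst w))) := by
      rw [buildIndex, buildIndex_get? title _ hn items PySem.Dict.empty]
      simp
    have hpred : (fun e : String × String => pyMatches w e.1.toList && !(title == e.2))
        = (fun kv : String × String => (!(kv.1 == "") && !(kv.2 == title))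
            && (String.ofList (normFirst kv.1.toList) == String.ofList (normFirst w))) := by
      funext e
      by_cases he : e.1 = ""
      · have h2 : pyMatches w [] = false := by
          cases w with
          | nil => exact absurd rfl hw
          | cons c cs => simp [pyMatches]
        simp [he, h2]
      · rw [pyMatches_eq w e.1.toList hw, ofList_beq, Bool.eq_iff_iff]
        simp only [Bool.and_eq_true, beq_iff_eq, Bool.not_eq_eq_eq_not, Bool.not_true,
          beq_eq_false_iff_ne, ne_eq]
        constructor
        · rintro ⟨h1, h2⟩
          exact ⟨⟨he, fun hh => h2 hh.symm⟩, h1.symm⟩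
        · rintro ⟨⟨-, h2⟩, h3⟩
          exact ⟨h3.symm, fun hh => h2 hh.symm⟩
    rw [chunkA, scanA_eq_find?, hpred]
    rw [flushB]
    simp only [hwe, Bool.false_eq_true, if_false, hget]
    cases hf : items.find? (fun kv => (!(kv.1 == "") && !(kv.2 == title))
        && (String.ofList (normFirst kv.1.toList) == String.ofList (normFirst w))) with
    | none => simp
    | some kt =>
      obtain ⟨k, t⟩ := kt
      cases hkt : (k == t) <;> simp [hkt]

theorem keys_ne_aux (P : String → Prop) :
    ∀ (l : List (String × String)) (d : PySem.Dict String String),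
      (∀ p ∈ l, P p.1) → (∀ p ∈ d.items, P p.1) →
      ∀ p ∈ (l.foldl (fun d kv => d.insert kv.1 kv.2) d).items, P p.1 := by
  intro l
  induction l with
  | nil => intro d _ hd; exact hd
  | cons kv rest ih =>
    intro d hl hd
    refine ih (d.insert kv.1 kv.2) (fun p hp => hl p (List.mem_cons_of_mem _ hp)) ?_
    intro p hp
    rcases (PySem.Dict.mem_items_insert _ _ _ _).1 hp with h | ⟨h, _⟩
    · subst h; exact hl kv (List.mem_cons_self)
    · exact hd p h

theorem keys_ne_empty' (redirects : List (String × String))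
    (hp : ∀ p ∈ redirects, p.1 ≠ "") :
    ∀ p ∈ (PySem.Dict.ofList redirects).items, p.1 ≠ "" := by
  have h0 : PySem.Dict.ofList redirects
      = redirects.foldl (fun d kv => d.insert kv.1 kv.2) PySem.Dict.empty := rfl
  rw [h0]
  exact keys_ne_aux (fun s => s ≠ "") redirects PySem.Dict.empty hp
    (by intro p hp; simp [PySem.Dict.empty] at hp)

theorem set_letters : PySem.Set.ofList asciiLettersList = asciiLettersList := by
  apply PySem.Set.ofList_eq_self_of_nodup
  decide

theorem loop_eq (title : String) (items : List (String × String))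
    (hk : ∀ p ∈ items, p.1 ≠ "") :
    ∀ (L : List Char) (out : List String) (w : List Char),
      L.foldl (stepA title items) ((out.map String.toList).flatten, w)
        = (((L.foldl (stepB (PySem.Set.ofList asciiLettersList) (buildIndex title items)) (out, w)).1.map String.toList).flatten,
           (L.foldl (stepB (PySem.Set.ofList asciiLettersList) (buildIndex title items)) (out, w)).2) := by
  intro L
  induction L with
  | nil => intro out w; rfl
  | cons ch L ih =>
    intro out w
    rw [List.foldl_cons, List.foldl_cons]
    by_cases hm : ch ∈ asciiLettersList
    · have hc : asciiLettersList.contains ch = true := by simpa using hm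
      have hA : stepA title items ((out.map String.toList).flatten, w) ch
          = ((out.map String.toList).flatten, w ++ [ch]) := by
        simp [stepA, hm]
      have hB : stepB (PySem.Set.ofList asciiLettersList) (buildIndex title items) (out, w) ch
          = (out, w ++ [ch]) := by
        simp [stepB, set_letters, hm]
      rw [hA, hB, ih out (w ++ [ch])]
    · have hc : asciiLettersList.contains ch = false := by simpa using hm
      have hA : stepA title items ((out.map String.toList).flatten, w) ch
          = (((out ++ [flushB (buildIndex title items) w, String.ofList [ch]]).map String.toList).flatten, []) := by
        simp [stepA, hm, chunk_eq title items hk w]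
      have hB : stepB (PySem.Set.ofList asciiLettersList) (buildIndex title items) (out, w) ch
          = (out ++ [flushB (buildIndex title items) w, String.ofList [ch]], []) := by
        simp [stepB, set_letters, hm]
      rw [hA, hB, ih (out ++ [flushB (buildIndex title items) w, String.ofList [ch]]) []]

-- ===== VERDICT (by name: the statement is the Claim_ definition above) =====
theorem hyperlink_spec : Claim_equal_hyperlink := by
  unfold Claim_equal_hyperlink
  intro article title redirects _ hpre
  unfold Spec_hyperlink
  have hk := keys_ne_empty' redirects hpre
  simp only [hyperlink, hyperlink_alt]
  have hloop := loop_eq title ((PySem.Dict.ofList redirects).items) hk article.toList [] []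
  simp only [List.map_nil, List.flatten_nil] at hloop
  rw [hloop, join_empty, chunk_eq title _ hk]
  simp
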